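-- pv_equiv track=rewrite | github.com/W0438529/At-Home | Subnet Calculator/SubnetCalc.py | net_class
-- ===== SOURCE A (Python) =====
-- def net_class(add):
--     z = "A"
--     x = "B"
--     y = "C"
--     for r in range(1, 127):
--         add_list = add.split('.')
--         if int(add_list[0]) == r:
--             i = f'Network Class: {z}\n# of IP Addr: 16777216'
--             return i
--     for r in range(128, 191):
--         add_list = add.split('.')
--         if int(add_list[0]) == r:
--             j = f'Network Class: {x}\n# of IP Addr: 65536'
--             return j
--     for r in range(192, 223):
--         add_list = add.split('.')
--         if int(add_list[0]) == r:
--             k = f'Network Class: {y}\n# of IP Addr: 256'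
--             return k
-- ===== SOURCE B (Python) =====
-- def net_class(add):
--     first = int(add.split('.')[0])
--     if 1 <= first < 127:
--         return 'Network Class: A\n# of IP Addr: 16777216'
--     elif 128 <= first < 191:
--         return 'Network Class: B\n# of IP Addr: 65536'
--     elif 192 <= first < 223:
--         return 'Network Class: C\n# of IP Addr: 256'
-- ===== Notes on version B (the rewrite author's own statement) =====
-- stated objective: simpler
-- what changed: Replaced the three scanning loops over constant integer ranges (each iteration re-splitting the address and comparing the first octet to the loop counter) with one split/parse followed by a direct if/elif chain of range comparisons using the same exact bounds.
import Mathlib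
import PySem

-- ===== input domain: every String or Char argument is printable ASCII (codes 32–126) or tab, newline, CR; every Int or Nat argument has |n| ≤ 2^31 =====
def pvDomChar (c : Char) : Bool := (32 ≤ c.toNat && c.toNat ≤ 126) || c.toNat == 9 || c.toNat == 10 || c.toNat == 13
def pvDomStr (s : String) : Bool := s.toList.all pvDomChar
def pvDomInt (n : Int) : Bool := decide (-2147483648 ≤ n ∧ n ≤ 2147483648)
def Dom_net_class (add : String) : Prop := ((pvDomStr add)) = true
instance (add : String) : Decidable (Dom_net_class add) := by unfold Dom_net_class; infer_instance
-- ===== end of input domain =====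

-- B replaces A's three constant-range scanning loops by one split/parse and a direct if/elif chain of bound comparisons (same exact bounds).

-- ===== PORT A =====
-- one loop iteration body of A: re-split the address, parse octet 0, compare with r
def netClassScan (add : String) (rs : List Int) (res : String) : Option String :=
  match rs with
  | [] => none
  | r :: rest =>
    match (PySem.List.pyGet? (PySem.Chars.splitOn add.toList ['.']) 0).bind PySem.Int.ofChars? with
    | none => none  -- int() raises ValueError here; excluded by Pre_
    | some v => if v = r then some res else netClassScan add rest res

def net_class (add : String) : Option String :=
  match netClassScan add (PySem.List.pyRange 1 127 1) "Network Class: A\n# of IP Addr: 16777216" with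
  | some i => some i
  | none =>
  match netClassScan add (PySem.List.pyRange 128 191 1) "Network Class: B\n# of IP Addr: 65536" with
  | some j => some j
  | none =>
  match netClassScan add (PySem.List.pyRange 192 223 1) "Network Class: C\n# of IP Addr: 256" with
  | some k => some k
  | none => none

-- ===== PORT B =====
def net_class_alt (add : String) : Option String :=
  match (PySem.List.pyGet? (PySem.Chars.splitOn add.toList ['.']) 0).bind PySem.Int.ofChars? with
  | none => none  -- int() raises ValueError; excluded by Pre_
  | some first =>
    if 1 ≤ first ∧ first < 127 then some "Network Class: A\n# of IP Addr: 16777216"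
    else if 128 ≤ first ∧ first < 191 then some "Network Class: B\n# of IP Addr: 65536"
    else if 192 ≤ first ∧ first < 223 then some "Network Class: C\n# of IP Addr: 256"
    else none

-- ===== PRECONDITION & SPEC =====
-- Pre_ excludes exactly the inputs where int(add.split('.')[0]) raises ValueError (both A and B raise there).
def Pre_net_class (add : String) : Prop :=
  ((PySem.List.pyGet? (PySem.Chars.splitOn add.toList ['.']) 0).bind PySem.Int.ofChars?).isSome = true
instance (add : String) : Decidable (Pre_net_class add) := by unfold Pre_net_class; infer_instance
def pvWitness_net_class : String := "10.0.0.1"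

def Spec_net_class (add : String) (out : Option String) : Prop := out = net_class_alt add
instance (add : String) (out : Option String) : Decidable (Spec_net_class add out) := by unfold Spec_net_class; infer_instance

-- ===== CLAIM (what is proved, stated in full; the proofs are below) =====
def Claim_equal_net_class : Prop := ∀ (add : String), Dom_net_class add → Pre_net_class add → Spec_net_class add (net_class add)

-- ===== LEMMAS AND PROOFS =====
theorem netClassScan_eq (add : String) (res : String) (v : Int)
    (h : (PySem.List.pyGet? (PySem.Chars.splitOn add.toList ['.']) 0).bind PySem.Int.ofChars? = some v)
    (rs : List Int) :
    netClassScan add rs res = if v ∈ rs then some res else none := by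
  induction rs with
  | nil => simp [netClassScan]
  | cons r rest ih =>
    simp only [netClassScan, h, ih, List.mem_cons]
    by_cases hv : v = r <;> simp [hv]

-- ===== VERDICT (by name: the statement is the Claim_ definition above) =====
theorem net_class_spec : Claim_equal_net_class := by
  intro add _ hpre
  unfold Spec_net_class net_class net_class_alt
  obtain ⟨v, hv⟩ := Option.isSome_iff_exists.mp hpre
  rw [netClassScan_eq add _ v hv, netClassScan_eq add _ v hv, netClassScan_eq add _ v hv, hv]
  simp only [PySem.List.mem_pyRange_one]
  by_cases h1 : 1 ≤ v ∧ v < 127 <;> by_cases h2 : 128 ≤ v ∧ v < 191 <;>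
    by_cases h3 : 192 ≤ v ∧ v < 223 <;> simp [h1, h2, h3]
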